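-- pv_equiv track=rewrite | github.com/drGrove/github-to-terraform | utils.py | tf_context_for_contexts
-- ===== SOURCE A (Python) =====
-- def tf_context_for_contexts(contexts):
--     output = []
--     count = len(contexts)
--     for idx, context in enumerate(contexts):
--         ctx = f'"{context}"'
--         if idx < count - 1:
--             ctx += ","
--         output.append(ctx)
--     return output
-- ===== SOURCE B (Python) =====
-- def tf_context_for_contexts(contexts):
--     output = []
--     comma = ''
--     for context in reversed(contexts):
--         output.append('"' + context + '"' + comma)
--         comma = ','
--     output.reverse()
--     return output
-- ===== Notes on version B (the rewrite author's own statement) =====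
-- stated objective: alternative
-- what changed: Builds the output back-to-front: iterates over reversed(contexts) carrying a comma-suffix state that is empty only for the first (i.e. last) element, then reverses the result; this removes enumerate, len and the index-vs-count comparison entirely.
import Mathlib
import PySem

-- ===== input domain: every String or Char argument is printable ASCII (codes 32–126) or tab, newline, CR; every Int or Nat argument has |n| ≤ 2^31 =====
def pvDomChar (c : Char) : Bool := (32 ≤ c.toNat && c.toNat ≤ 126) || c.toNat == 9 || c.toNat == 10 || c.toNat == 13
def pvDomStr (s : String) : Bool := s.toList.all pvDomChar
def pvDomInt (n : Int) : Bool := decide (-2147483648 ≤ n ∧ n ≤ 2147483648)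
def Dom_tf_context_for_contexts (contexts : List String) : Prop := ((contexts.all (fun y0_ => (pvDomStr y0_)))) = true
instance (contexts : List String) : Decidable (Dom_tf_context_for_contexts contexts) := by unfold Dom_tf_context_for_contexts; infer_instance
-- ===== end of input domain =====

-- B builds the output back-to-front over reversed(contexts) with a comma-suffix state
-- (empty only for the first processed = last element), then reverses; no enumerate/len/index test.

-- ===== PORT A =====
def tf_context_for_contexts (contexts : List String) : List String :=
  let count : Int := contexts.length
  (PySem.List.enumerate contexts).foldl
    (fun output p =>
      let ctx := "\"" ++ p.2 ++ "\""
      let ctx := if p.1 < count - 1 then ctx ++ "," else ctx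
      output ++ [ctx]) []

-- ===== PORT B =====
def tf_context_for_contexts_alt (contexts : List String) : List String :=
  let s := contexts.reverse.foldl
    (fun (s : List String × String) context =>
      (s.1 ++ ["\"" ++ context ++ "\"" ++ s.2], ",")) ([], "")
  s.1.reverse

-- ===== PRECONDITION & SPEC =====
def Spec_tf_context_for_contexts (contexts : List String) (out : List String) : Prop := out = tf_context_for_contexts_alt contexts
instance (contexts : List String) (out : List String) : Decidable (Spec_tf_context_for_contexts contexts out) := by unfold Spec_tf_context_for_contexts; infer_instance

-- ===== CLAIM (what is proved, stated in full; the proofs are below) =====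
def Claim_equal_tf_context_for_contexts : Prop := ∀ (contexts : List String), Dom_tf_context_for_contexts contexts → Spec_tf_context_for_contexts contexts (tf_context_for_contexts contexts)

-- ===== LEMMAS AND PROOFS =====

-- shared characterisation: quote each, comma on all but the last
def pvAux : List String → List String
  | [] => []
  | [x] => ["\"" ++ x ++ "\""]
  | x :: y :: t => ("\"" ++ x ++ "\"" ++ ",") :: pvAux (y :: t)

theorem pvA_enum (xs : List String) (s n : Int) (h : s + xs.length = n) :
    (PySem.List.enumerate xs s).map
      (fun p => if p.1 < n - 1 then "\"" ++ p.2 ++ "\"" ++ "," else "\"" ++ p.2 ++ "\"") = pvAux xs := by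
  induction xs generalizing s with
  | nil => simp [PySem.List.enumerate_nil, pvAux]
  | cons x t ih =>
    rw [PySem.List.enumerate_cons]
    cases t with
    | nil =>
      simp only [List.length_cons, List.length_nil] at h
      simp [PySem.List.enumerate_nil, pvAux]
      omega
    | cons y ts =>
      have hc : s < n - 1 := by
        simp only [List.length_cons] at h; push_cast at h; omega
      have := ih (s := s + 1) (by
        simp only [List.length_cons] at h ⊢; push_cast at h ⊢; omega)
      simp only [List.map_cons, this, pvAux, if_pos hc]

theorem pvA_eq (xs : List String) : tf_context_for_contexts xs = pvAux xs := by
  have hfold : ∀ (l : List (Int × String)) (acc : List String) (f : Int × String → String),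
      l.foldl (fun output p => output ++ [f p]) acc = acc ++ l.map f := by
    intro l
    induction l with
    | nil => simp
    | cons a t ih => intro acc f; simp [List.foldl_cons, ih, List.append_assoc]
  unfold tf_context_for_contexts
  simp only []
  rw [hfold (f := fun p => if p.1 < (xs.length : Int) - 1 then "\"" ++ p.2 ++ "\"" ++ "," else "\"" ++ p.2 ++ "\"")]
  · rw [List.nil_append, pvA_enum xs 0 xs.length (by omega)]

-- the B fold in its steady state (comma = ",") just maps quote-and-comma
theorem pvB_fold (r : List String) (acc : List String) :
    (r.foldl (fun (s : List String × String) context =>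
        (s.1 ++ ["\"" ++ context ++ "\"" ++ s.2], ",")) (acc, ",")).1
      = acc ++ r.map (fun c => "\"" ++ c ++ "\"" ++ ",") := by
  induction r generalizing acc with
  | nil => simp
  | cons a t ih => simp [List.foldl_cons, ih, List.append_assoc]

theorem pvAux_concat (ys : List String) (z : String) :
    pvAux (ys ++ [z]) = ys.map (fun c => "\"" ++ c ++ "\"" ++ ",") ++ ["\"" ++ z ++ "\""] := by
  induction ys with
  | nil => simp [pvAux]
  | cons a t ih =>
    cases t with
    | nil => simp [pvAux]
    | cons b ts => simpa [pvAux] using ih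

theorem pvB_eq (xs : List String) : tf_context_for_contexts_alt xs = pvAux xs := by
  unfold tf_context_for_contexts_alt
  induction xs using List.reverseRecOn with
  | nil => simp [pvAux]
  | append_singleton ys z _ =>
    rw [List.reverse_append, List.reverse_singleton, List.singleton_append, List.foldl_cons]
    simp only [List.nil_append]
    rw [pvB_fold]
    have hz : "\"" ++ z ++ "\"" ++ "" = "\"" ++ z ++ "\"" := by
      simp [String.append_empty]
    rw [pvAux_concat]
    simp [hz, List.map_reverse]

-- ===== VERDICT (by name: the statement is the Claim_ definition above) =====
theorem tf_context_for_contexts_spec : Claim_equal_tf_context_for_contexts := by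
  intro xs _
  unfold Spec_tf_context_for_contexts
  rw [pvA_eq, pvB_eq]
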